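-- pv_equiv track=rewrite | github.com/TenmonAI/tenmon-ark | api/automation/tenmon_final_pwa_surface_last_mile_v1.py | detect_semantic_close_dup
-- ===== SOURCE A (Python) =====
-- def detect_semantic_close_dup(text: str) -> bool:
--     """末尾付近の同一・類似クローズ（定型二重）"""
--     paras = [p.strip() for p in (text or "").split("\n\n") if p.strip()]
--     if len(paras) < 2:
--         return False
--     tails = [p[-min(len(p), 100) :] for p in paras[-3:]]
--     for i in range(len(tails)):
--         for j in range(i + 1, len(tails)):
--             if tails[i] == tails[j] and len(tails[i]) >= 20:
--                 return True
--     return False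
-- ===== SOURCE B (Python) =====
-- def detect_semantic_close_dup(text: str) -> bool:
--     """末尾付近の同一・類似クローズ（定型二重）"""
--     paras = [p.strip() for p in (text or "").split("\n\n") if p.strip()]
--     if len(paras) < 2:
--         return False
--     seen = set()
--     for p in paras[-3:]:
--         t = p[-100:]
--         if len(t) >= 20:
--             if t in seen:
--                 return True
--             seen.add(t)
--     return False
-- ===== Notes on version B (the rewrite author's own statement) =====
-- stated objective: simpler
-- what changed: Replaces the nested pairwise comparison over the tail list with a single pass that dedups via a seen-set (equal strings share length, so only tails of length >= 20 need checking or storing).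
import Mathlib
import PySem

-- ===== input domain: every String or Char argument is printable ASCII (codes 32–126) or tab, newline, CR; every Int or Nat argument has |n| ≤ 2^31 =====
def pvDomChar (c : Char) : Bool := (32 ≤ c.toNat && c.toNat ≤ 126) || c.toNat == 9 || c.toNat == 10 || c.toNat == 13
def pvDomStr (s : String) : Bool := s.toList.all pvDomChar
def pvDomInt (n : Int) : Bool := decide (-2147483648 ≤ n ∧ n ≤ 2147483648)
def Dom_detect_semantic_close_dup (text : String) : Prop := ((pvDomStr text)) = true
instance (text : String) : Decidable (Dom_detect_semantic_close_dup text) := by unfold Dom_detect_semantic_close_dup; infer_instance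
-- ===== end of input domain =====

-- B replaces A's nested pairwise scan over the tails with a single pass over a seen-set (simpler; same result since equal strings share length).

-- ===== PORT A =====
def detect_semantic_close_dup (text : String) : Bool :=
  let paras := (((PySem.Str.split? text "\n\n").getD []).map PySem.Str.strip).filter
      (fun p => PySem.Str.len p != 0)     -- split? is some: the separator "\n\n" is nonempty
  if paras.length < 2 then false
  else
    let tails := (PySem.List.slice paras (some (-3)) none).map
      (fun p => PySem.Str.slice p (some (-(min (PySem.Str.len p) 100))) none)
    (PySem.List.pyRange 0 (PySem.List.len tails) 1).any (fun i =>
      (PySem.List.pyRange (i + 1) (PySem.List.len tails) 1).any (fun j =>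
        (PySem.List.pyGetD tails i "" == PySem.List.pyGetD tails j "")
          && decide (20 ≤ PySem.Str.len (PySem.List.pyGetD tails i ""))))

-- ===== PORT B =====
def pvGoB (ps : List String) (seen : PySem.Set String) : Bool :=
  match ps with
  | [] => false
  | p :: rest =>
    let t := PySem.Str.slice p (some (-100)) none
    if 20 ≤ PySem.Str.len t then
      if PySem.Set.contains seen t then true
      else pvGoB rest (PySem.Set.add seen t)
    else pvGoB rest seen

def detect_semantic_close_dup_alt (text : String) : Bool :=
  let paras := (((PySem.Str.split? text "\n\n").getD []).map PySem.Str.strip).filter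
      (fun p => PySem.Str.len p != 0)     -- split? is some: the separator "\n\n" is nonempty
  if paras.length < 2 then false
  else pvGoB (PySem.List.slice paras (some (-3)) none) PySem.Set.empty

-- ===== PRECONDITION & SPEC =====
def Spec_detect_semantic_close_dup (text : String) (out : Bool) : Prop := out = detect_semantic_close_dup_alt text
instance (text : String) (out : Bool) : Decidable (Spec_detect_semantic_close_dup text out) := by unfold Spec_detect_semantic_close_dup; infer_instance

-- ===== CLAIM (what is proved, stated in full; the proofs are below) =====
def Claim_equal_detect_semantic_close_dup : Prop := ∀ (text : String), Dom_detect_semantic_close_dup text → Spec_detect_semantic_close_dup text (detect_semantic_close_dup text)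

-- ===== LEMMAS AND PROOFS =====

-- p[-min(len(p),100):] = p[-100:] (both clamp to the whole string when len(p) ≤ 100)
lemma pv_tail_eq (p : String) :
    PySem.Str.slice p (some (-(min (PySem.Str.len p) 100))) none
      = PySem.Str.slice p (some (-100)) none := by
  apply String.toList_inj.mp
  simp only [pysem]
  rw [PySem.List.slice_some_none, PySem.List.slice_some_none]
  rcases Nat.eq_zero_or_pos p.toList.length with h0 | hpos
  · simp [List.eq_nil_of_length_eq_zero h0]
  · have hmin : (-(min ((p.toList.length : Int)) 100)) = -((min p.toList.length 100 : Nat) : Int) := by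
      push_cast; ring
    rw [hmin, PySem.List.clampIdx_neg_natCast _ _ (by omega),
        PySem.List.clampIdx_neg_ofNat _ 100 (by omega)]
    congr 1
    omega

set_option maxHeartbeats 2000000 in
set_option maxRecDepth 4000 in
lemma pv_main (ps : List String) (h : ps.length ≤ 3) :
    ((PySem.List.pyRange 0 (PySem.List.len (ps.map
        (fun p => PySem.Str.slice p (some (-(min (PySem.Str.len p) 100))) none))) 1).any (fun i =>
      (PySem.List.pyRange (i + 1) (PySem.List.len (ps.map
        (fun p => PySem.Str.slice p (some (-(min (PySem.Str.len p) 100))) none))) 1).any (fun j =>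
        (PySem.List.pyGetD (ps.map
        (fun p => PySem.Str.slice p (some (-(min (PySem.Str.len p) 100))) none)) i "" ==
         PySem.List.pyGetD (ps.map
        (fun p => PySem.Str.slice p (some (-(min (PySem.Str.len p) 100))) none)) j "")
          && decide (20 ≤ PySem.Str.len (PySem.List.pyGetD (ps.map
        (fun p => PySem.Str.slice p (some (-(min (PySem.Str.len p) 100))) none)) i "")))))
    = pvGoB ps PySem.Set.empty := by
  simp only [pv_tail_eq]
  rcases ps with _ | ⟨a, _ | ⟨b, _ | ⟨c, _ | ⟨d, rest⟩⟩⟩⟩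
  · -- []
    have h0 : PySem.List.len (([] : List String).map (fun p => PySem.Str.slice p (some (-100)) none)) = (0:Int) := by
      simp [pysem]
    rw [h0]
    have r : PySem.List.pyRange 0 0 1 = [] := by decide
    rw [r]
    simp [pvGoB]
  · -- [a]
    have h1 : PySem.List.len ([a].map (fun p => PySem.Str.slice p (some (-100)) none)) = (1:Int) := by
      simp [pysem]
    rw [h1]
    have r0 : PySem.List.pyRange 0 1 1 = [0] := by decide
    have r1 : PySem.List.pyRange ((0:Int)+1) 1 1 = [] := by decide
    simp only [r0, List.any_cons, List.any_nil, r1]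
    simp only [pvGoB, PySem.Set.empty]
    simp [pysem]
  · -- [a, b]
    have h2 : PySem.List.len ([a,b].map (fun p => PySem.Str.slice p (some (-100)) none)) = (2:Int) := by
      simp [pysem]
    rw [h2]
    have r0 : PySem.List.pyRange 0 2 1 = [0,1] := by decide
    simp only [r0, List.any_cons, List.any_nil]
    have r1 : PySem.List.pyRange ((0:Int)+1) 2 1 = [1] := by decide
    have r2 : PySem.List.pyRange ((1:Int)+1) 2 1 = [] := by decide
    simp only [r1, r2, List.any_cons, List.any_nil, List.map_cons, List.map_nil]
    simp only [pysem, List.getD_cons_zero, List.getD_cons_succ]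
    simp only [pvGoB]
    simp only [PySem.Set.add_eq_ite, pysem]
    have ha : PySem.List.slice a.toList (some (-100)) none = (PySem.Str.slice a (some (-100)) none).toList := by simp [pysem]
    have hb : PySem.List.slice b.toList (some (-100)) none = (PySem.Str.slice b (some (-100)) none).toList := by simp [pysem]
    rw [ha, hb]
    generalize PySem.Str.slice a (some (-100)) none = x
    generalize PySem.Str.slice b (some (-100)) none = y
    clear ha hb h2 r0 r1 r2
    by_cases hxy : x = y <;> simp_all [List.contains_eq_mem]
    simp [beq_eq_false_iff_ne.mpr hxy]
    exact fun _ _ h => hxy h.symm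
  · -- [a, b, c]
    have h3 : PySem.List.len ([a,b,c].map (fun p => PySem.Str.slice p (some (-100)) none)) = (3:Int) := by
      simp [pysem]
    rw [h3]
    have r0 : PySem.List.pyRange 0 3 1 = [0,1,2] := by decide
    simp only [r0, List.any_cons, List.any_nil]
    have r1 : PySem.List.pyRange ((0:Int)+1) 3 1 = [1,2] := by decide
    have r2 : PySem.List.pyRange ((1:Int)+1) 3 1 = [2] := by decide
    have r3 : PySem.List.pyRange ((2:Int)+1) 3 1 = [] := by decide
    simp only [r1, r2, r3, List.any_cons, List.any_nil, List.map_cons, List.map_nil]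
    simp only [pysem, List.getD_cons_zero, List.getD_cons_succ]
    simp only [pvGoB]
    simp only [PySem.Set.add_eq_ite, pysem]
    have ha : PySem.List.slice a.toList (some (-100)) none = (PySem.Str.slice a (some (-100)) none).toList := by simp [pysem]
    have hb : PySem.List.slice b.toList (some (-100)) none = (PySem.Str.slice b (some (-100)) none).toList := by simp [pysem]
    have hc : PySem.List.slice c.toList (some (-100)) none = (PySem.Str.slice c (some (-100)) none).toList := by simp [pysem]
    rw [ha, hb, hc]
    generalize PySem.Str.slice a (some (-100)) none = x
    generalize PySem.Str.slice b (some (-100)) none = y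
    generalize PySem.Str.slice c (some (-100)) none = z
    clear ha hb hc h3 r0 r1 r2 r3
    by_cases hxy : x = y <;> by_cases hxz : x = z <;> by_cases hyz : y = z <;>
      simp_all [List.contains_eq_mem]
    · simp [beq_eq_false_iff_ne.mpr hxy, beq_eq_false_iff_ne.mpr hyz]
    · simp [beq_eq_false_iff_ne.mpr hxy, beq_eq_false_iff_ne.mpr hxz, beq_eq_false_iff_ne.mpr hyz]
      split_ifs <;>
        first
          | exact ⟨fun h => hxy h.symm, fun _ => ⟨fun h => hxz h.symm, fun h => hyz h.symm⟩⟩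
          | exact fun _ h => hxz h.symm
          | exact fun _ _ h => hyz h.symm
  · -- longer than 3: contradiction
    simp at h
    omega

-- ===== VERDICT (by name: the statement is the Claim_ definition above) =====
theorem detect_semantic_close_dup_spec : Claim_equal_detect_semantic_close_dup := by
  intro text _
  unfold Spec_detect_semantic_close_dup detect_semantic_close_dup detect_semantic_close_dup_alt
  simp only
  split
  · rfl
  · exact pv_main _ (by
      rw [PySem.List.slice_from_neg_ofNat _ 3 (by omega)]
      simp
      omega)
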